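-- pv_equiv track=rewrite | github.com/Brawek/sprawdzian_nierodka | 2.py | algorytm_cyfry
-- ===== SOURCE A (Python) =====
-- def algorytm_cyfry(n):
--     c = 0
--     b = 1
--     licznik_dodawan = 0
--
--     temp_n = n
--     while temp_n > 0:
--         a = temp_n % 10
--         if a % 2 == 0:
--             c = c + (a // 2) * b
--         else:
--             c = c + b
--             licznik_dodawan += 1
--
--         b = b * 10
--         temp_n = temp_n // 10
--
--     return c, licznik_dodawan
-- ===== SOURCE B (Python) =====
-- def algorytm_cyfry(n):
--     if n <= 0:
--         return 0, 0
--     c, k = algorytm_cyfry(n // 10)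
--     d = n % 10
--     return c * 10 + (d // 2 if d % 2 == 0 else 1), k + d % 2
-- ===== Notes on version B (the rewrite author's own statement) =====
-- stated objective: alternative
-- what changed: Replaces the iterative LSB-first loop carrying a place-value multiplier b with a most-significant-first structural recursion on the decimal quotient that multiply-accumulates the mapped digits, removing the b state entirely.
import Mathlib
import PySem

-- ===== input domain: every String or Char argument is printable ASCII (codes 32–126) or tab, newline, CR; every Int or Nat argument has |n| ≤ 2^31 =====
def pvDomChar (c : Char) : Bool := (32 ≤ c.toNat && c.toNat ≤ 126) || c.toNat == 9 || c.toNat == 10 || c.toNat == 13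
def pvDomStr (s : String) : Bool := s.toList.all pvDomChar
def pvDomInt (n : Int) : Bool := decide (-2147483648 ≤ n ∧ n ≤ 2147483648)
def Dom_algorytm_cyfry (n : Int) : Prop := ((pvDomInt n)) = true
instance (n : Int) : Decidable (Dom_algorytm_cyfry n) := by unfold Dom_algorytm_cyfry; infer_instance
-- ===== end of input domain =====

-- B replaces A's LSB-first while-loop with its place-value multiplier b by an MSB-first
-- structural recursion on n // 10 accumulating c*10 + digit (objective: alternative).

-- ===== PORT A =====
-- the while-loop of A, state (temp_n, c, b, licznik_dodawan)
def algorytmLoopA (temp_n c b licznik : Int) : Int × Int :=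
  if _h : temp_n > 0 then
    let a := PySem.Int.mod temp_n 10
    if PySem.Int.mod a 2 = 0 then
      algorytmLoopA (PySem.Int.floordiv temp_n 10) (c + PySem.Int.floordiv a 2 * b) (b * 10) licznik
    else
      algorytmLoopA (PySem.Int.floordiv temp_n 10) (c + b) (b * 10) (licznik + 1)
  else
    (c, licznik)
termination_by temp_n.toNat
decreasing_by
  all_goals
    rw [PySem.Int.floordiv_eq_ediv_of_pos (by norm_num : (0:Int) < 10)]
    omega

def algorytm_cyfry (n : Int) : Int × Int :=
  algorytmLoopA n 0 1 0

-- ===== PORT B =====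
def algorytm_cyfry_alt (n : Int) : Int × Int :=
  if _h : n ≤ 0 then (0, 0)
  else
    let p := algorytm_cyfry_alt (PySem.Int.floordiv n 10)
    let d := PySem.Int.mod n 10
    (p.1 * 10 + (if PySem.Int.mod d 2 = 0 then PySem.Int.floordiv d 2 else 1),
     p.2 + PySem.Int.mod d 2)
termination_by n.toNat
decreasing_by
  rw [PySem.Int.floordiv_eq_ediv_of_pos (by norm_num : (0:Int) < 10)]
  omega

-- ===== PRECONDITION & SPEC =====
def Spec_algorytm_cyfry (n : Int) (out : Int × Int) : Prop := out = algorytm_cyfry_alt n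
instance (n : Int) (out : Int × Int) : Decidable (Spec_algorytm_cyfry n out) := by unfold Spec_algorytm_cyfry; infer_instance

-- ===== CLAIM (what is proved, stated in full; the proofs are below) =====
def Claim_equal_algorytm_cyfry : Prop := ∀ (n : Int), Dom_algorytm_cyfry n → Spec_algorytm_cyfry n (algorytm_cyfry n)

-- ===== LEMMAS AND PROOFS =====

-- one-step unfolding of B for positive input, keeping the recursive call folded
lemma alt_pos (t : Int) (h : 0 < t) :
    algorytm_cyfry_alt t =
      ((algorytm_cyfry_alt (PySem.Int.floordiv t 10)).1 * 10 +
         (if PySem.Int.mod (PySem.Int.mod t 10) 2 = 0 then PySem.Int.floordiv (PySem.Int.mod t 10) 2 else 1),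
       (algorytm_cyfry_alt (PySem.Int.floordiv t 10)).2 + PySem.Int.mod (PySem.Int.mod t 10) 2) := by
  conv_lhs => rw [algorytm_cyfry_alt]
  simp [show ¬ t ≤ 0 by omega]

-- loop invariant: A's loop adds b-scaled B-result to the accumulators
lemma algorytmLoopA_inv (t c b l : Int) :
    algorytmLoopA t c b l =
      (c + b * (algorytm_cyfry_alt t).1, l + (algorytm_cyfry_alt t).2) := by
  fun_induction algorytmLoopA t c b l with
  | case1 t c b l h a heven ih =>
      rw [ih, alt_pos t h]
      simp only [a] at heven
      refine Prod.ext ?_ ?_ <;> simp only [a, heven, if_true] <;> ring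
  | case2 t c b l h a hodd ih =>
      rw [ih, alt_pos t h]
      simp only [a] at hodd
      have hm : PySem.Int.mod (PySem.Int.mod t 10) 2 = 1 := by
        rw [PySem.Int.mod_eq_emod_of_pos (by norm_num)] at hodd ⊢
        omega
      rw [hm]
      refine Prod.ext ?_ ?_ <;> norm_num <;> ring
  | case3 t c b l h =>
      rw [algorytm_cyfry_alt]
      simp [show t ≤ 0 by omega]

-- ===== VERDICT (by name: the statement is the Claim_ definition above) =====
theorem algorytm_cyfry_spec : Claim_equal_algorytm_cyfry := by
  intro n _
  unfold Spec_algorytm_cyfry algorytm_cyfry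
  rw [algorytmLoopA_inv]
  simp
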